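-- pv_equiv track=rewrite | github.com/Zarainia/deoplete-donkeytale-database | rplugin/python3/deoplete/source/database.py | _get_event_argument_number
-- ===== SOURCE A (Python) =====
-- def _get_event_argument_number(text):
-- 	search_string = "event"
-- 	ind = text.rfind(search_string) + len(search_string)
-- 	groups = 0
-- 	balance = 0
-- 	for char in text[ind:]:
-- 		match char:
-- 			case '{':
-- 				balance += 1
-- 			case '}':
-- 				balance -= 1
-- 				if balance == 0:
-- 					groups += 1
-- 	return groups, balance
-- ===== SOURCE B (Python) =====
-- def _get_event_argument_number(text):
-- 	suffix = text[text.rfind("event") + len("event"):]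
-- 	deltas = [1 if c == '{' else -1 if c == '}' else 0 for c in suffix]
-- 	cums = []
-- 	total = 0
-- 	for d in deltas:
-- 		total += d
-- 		cums.append(total)
-- 	groups = sum(1 for c, cum in zip(suffix, cums) if c == '}' and cum == 0)
-- 	balance = cums[-1] if cums else 0
-- 	return groups, balance
-- ===== Notes on version B (the rewrite author's own statement) =====
-- stated objective: alternative
-- what changed: Replaces A's single fused stateful loop (balance and group count updated together per character) with a build-table-then-scan decomposition: a delta list, a materialized list of running cumulative balances, then a separate pass counting closing-brace positions whose cumulative balance is zero and taking the last cumulative value as the balance.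
import Mathlib
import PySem

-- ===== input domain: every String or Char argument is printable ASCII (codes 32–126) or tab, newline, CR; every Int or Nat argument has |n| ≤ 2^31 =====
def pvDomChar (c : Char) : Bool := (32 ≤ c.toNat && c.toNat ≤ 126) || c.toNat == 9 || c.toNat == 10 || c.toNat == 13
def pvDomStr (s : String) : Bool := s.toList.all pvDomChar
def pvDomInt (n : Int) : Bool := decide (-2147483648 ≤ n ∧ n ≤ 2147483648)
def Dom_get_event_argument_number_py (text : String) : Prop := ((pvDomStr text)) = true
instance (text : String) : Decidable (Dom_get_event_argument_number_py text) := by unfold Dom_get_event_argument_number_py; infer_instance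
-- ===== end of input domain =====

-- B replaces A's single fused stateful loop by a build-table-then-scan decomposition
-- (delta list, materialized running balances, separate counting pass); objective: alternative.

-- ===== PORT A =====
-- one step of A's for-loop over the suffix (match on char, fused groups/balance state)
def pvStepA (st : Int × Int) (c : Char) : Int × Int :=
  if c = '{' then (st.1, st.2 + 1)
  else if c = '}' then
    (if st.2 - 1 = 0 then st.1 + 1 else st.1, st.2 - 1)
  else st

def get_event_argument_number_py (text : String) : Int × Int :=
  let ind : Int := PySem.Str.rfind text "event" + 5
  (PySem.Str.slice text (some ind) none).toList.foldl pvStepA (0, 0)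

-- ===== PORT B =====
-- delta of one character (the comprehension's conditional expression)
def pvDelta (c : Char) : Int := if c = '{' then 1 else if c = '}' then -1 else 0

-- the loop that builds the cumulative-balance table (total := running sum, append)
def pvCums (total : Int) : List Int → List Int
  | [] => []
  | d :: ds => (total + d) :: pvCums (total + d) ds

def get_event_argument_number_py_alt (text : String) : Int × Int :=
  let ind : Int := PySem.Str.rfind text "event" + 5
  let suffix := (PySem.Str.slice text (some ind) none).toList
  let deltas := suffix.map pvDelta
  let cums := pvCums 0 deltas
  let groups : Int :=
    ((suffix.zip cums).filter (fun p => p.1 = '}' ∧ p.2 = 0)).length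
  let balance : Int := (cums.getLast?).getD 0
  (groups, balance)

-- ===== PRECONDITION & SPEC =====
def Spec_get_event_argument_number_py (text : String) (out : Int × Int) : Prop := out = get_event_argument_number_py_alt text
instance (text : String) (out : Int × Int) : Decidable (Spec_get_event_argument_number_py text out) := by unfold Spec_get_event_argument_number_py; infer_instance

-- ===== CLAIM (what is proved, stated in full; the proofs are below) =====
def Claim_equal_get_event_argument_number_py : Prop := ∀ (text : String), Dom_get_event_argument_number_py text → Spec_get_event_argument_number_py text (get_event_argument_number_py text)

-- ===== LEMMAS AND PROOFS =====

-- the last running balance is the start plus the sum of the deltas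
lemma pvCums_getLast? (ds : List Int) (t : Int) :
    (pvCums t ds).getLast? = if ds = [] then none else some (t + ds.sum) := by
  induction ds generalizing t with
  | nil => simp [pvCums]
  | cons d ds ih =>
    rcases ds with _ | ⟨e, es⟩
    · simp [pvCums]
    · have h := ih (t + d)
      simp only [pvCums] at h ⊢
      simp [List.getLast?_cons] at h ⊢
      omega

-- the last running balance starting from 0 (getD 0) is the sum of the deltas
lemma pvCums_getLast (ds : List Int) :
    ((pvCums 0 ds).getLast?).getD 0 = ds.sum := by
  rw [pvCums_getLast?]
  rcases ds with _ | _ <;> simp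

-- main invariant: A's fused fold from (g, b) equals (g + B's count with balances offset by b, b + sum of deltas)
lemma pvFold_eq (cs : List Char) (g b : Int) :
    cs.foldl pvStepA (g, b) =
      (g + (((cs.zip (pvCums b (cs.map pvDelta))).filter
              (fun p => p.1 = '}' ∧ p.2 = 0)).length : Int),
       b + (cs.map pvDelta).sum) := by
  induction cs generalizing g b with
  | nil => simp
  | cons c cs ih =>
    simp only [List.foldl_cons, List.map_cons, pvCums, List.zip_cons_cons,
      List.filter_cons, List.sum_cons]
    by_cases h1 : c = '{'
    · subst h1
      rw [ih]
      simp [pvStepA, pvDelta]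
      omega
    · by_cases h2 : c = '}'
      · subst h2
        rw [ih]
        by_cases hb : b - 1 = 0
        · have hb1 : b = 1 := by omega
          subst hb1
          simp [pvStepA, pvDelta]
          omega
        · have e1 : b + -1 = b - 1 := by ring
          simp [pvStepA, pvDelta, hb, e1]
          omega
      · rw [ih]
        simp [pvStepA, pvDelta, h1, h2]

-- ===== VERDICT (by name: the statement is the Claim_ definition above) =====
theorem get_event_argument_number_py_spec : Claim_equal_get_event_argument_number_py := by
  intro text _
  unfold Spec_get_event_argument_number_py get_event_argument_number_py get_event_argument_number_py_alt
  simp only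
  rw [pvFold_eq]
  rw [pvCums_getLast]
  simp
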